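-- pv_equiv track=rewrite | github.com/pvestal/anime-studio | packages/narrative_state/decay.py | decay_body_state
-- ===== SOURCE A (Python) =====
-- _BODY_STATE_DECAY = {
--     "wet": ("damp", 2),
--     "damp": ("dry", 1),
--     "dry": ("clean", 0),
--     "bloody": ("stained", 2),
--     "stained": ("clean", 1),
--     "dirty": ("dusty", 2),
--     "dusty": ("clean", 1),
--     "sweaty": ("clean", 1),
--     "clean": ("clean", 0),
-- }
--
-- def decay_body_state(body_state: str, scenes_elapsed: int = 1) -> str:
--     """Decay body state. Multiple scenes_elapsed can skip steps."""
--     current = body_state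
--     for _ in range(scenes_elapsed):
--         entry = _BODY_STATE_DECAY.get(current)
--         if entry is None or entry[1] == 0:
--             break
--         current = entry[0]
--     return current
-- ===== SOURCE B (Python) =====
-- # B: the decay table is a fixed module constant, so the full decay path of every
-- # known state is precomputed as data; the answer is a single clamped index, no loop.
-- _DECAY_PATHS = {
--     "wet": ["wet", "damp", "dry"],
--     "damp": ["damp", "dry"],
--     "dry": ["dry"],
--     "bloody": ["bloody", "stained", "clean"],
--     "stained": ["stained", "clean"],
--     "dirty": ["dirty", "dusty", "clean"],
--     "dusty": ["dusty", "clean"],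
--     "sweaty": ["sweaty", "clean"],
--     "clean": ["clean"],
-- }
--
-- def decay_body_state(body_state: str, scenes_elapsed: int = 1) -> str:
--     path = _DECAY_PATHS.get(body_state, [body_state])
--     return path[min(max(scenes_elapsed, 0), len(path) - 1)]
-- ===== Notes on version B (the rewrite author's own statement) =====
-- stated objective: simpler
-- what changed: A counts down scenes_elapsed through the decay table step by step; B replaces the loop entirely with a precomputed table of full decay paths (derivable once from the fixed constant) and returns the element at the clamped index min(max(scenes_elapsed,0), len(path)-1).
import Mathlib
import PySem

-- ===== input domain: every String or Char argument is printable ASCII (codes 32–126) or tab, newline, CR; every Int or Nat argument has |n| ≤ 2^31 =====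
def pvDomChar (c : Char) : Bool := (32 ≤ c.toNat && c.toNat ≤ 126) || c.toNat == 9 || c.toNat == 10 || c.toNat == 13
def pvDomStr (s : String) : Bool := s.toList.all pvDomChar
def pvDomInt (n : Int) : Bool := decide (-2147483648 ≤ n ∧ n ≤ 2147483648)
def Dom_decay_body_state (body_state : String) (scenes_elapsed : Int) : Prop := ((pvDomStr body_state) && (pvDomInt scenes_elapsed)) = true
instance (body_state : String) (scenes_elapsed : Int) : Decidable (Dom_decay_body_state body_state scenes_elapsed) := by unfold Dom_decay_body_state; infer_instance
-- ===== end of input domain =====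

-- B replaces A's per-scene countdown loop with a precomputed table of full decay paths and one clamped index; objective: simpler.

-- ===== PORT A =====
def bodyStateDecay : PySem.Dict String (String × Int) := PySem.Dict.mk
  [("wet", ("damp", 2)), ("damp", ("dry", 1)), ("dry", ("clean", 0)),
   ("bloody", ("stained", 2)), ("stained", ("clean", 1)), ("dirty", ("dusty", 2)),
   ("dusty", ("clean", 1)), ("sweaty", ("clean", 1)), ("clean", ("clean", 0))]

-- A's loop: 'for _ in range(scenes_elapsed)' with break; fuel is exactly the iteration count
def decayLoop : Nat → String → String
  | 0, cur => cur
  | n + 1, cur =>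
    match bodyStateDecay.get? cur with
    | none => cur
    | some entry => if entry.2 = 0 then cur else decayLoop n entry.1

def decay_body_state (body_state : String) (scenes_elapsed : Int) : String :=
  decayLoop scenes_elapsed.toNat body_state

-- ===== PORT B =====
-- B's precomputed path table (the dict literal _DECAY_PATHS of Source B)
def decayPaths : PySem.Dict String (List String) := PySem.Dict.mk
  [("wet", ["wet", "damp", "dry"]), ("damp", ["damp", "dry"]), ("dry", ["dry"]),
   ("bloody", ["bloody", "stained", "clean"]), ("stained", ["stained", "clean"]),
   ("dirty", ["dirty", "dusty", "clean"]), ("dusty", ["dusty", "clean"]),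
   ("sweaty", ["sweaty", "clean"]), ("clean", ["clean"])]

def decay_body_state_alt (body_state : String) (scenes_elapsed : Int) : String :=
  let path := (decayPaths.get? body_state).getD [body_state]
  (PySem.List.pyGet? path (min (max scenes_elapsed 0) ((path.length : Int) - 1))).getD body_state

-- ===== PRECONDITION & SPEC =====
def Spec_decay_body_state (body_state : String) (scenes_elapsed : Int) (out : String) : Prop := out = decay_body_state_alt body_state scenes_elapsed
instance (body_state : String) (scenes_elapsed : Int) (out : String) : Decidable (Spec_decay_body_state body_state scenes_elapsed out) := by unfold Spec_decay_body_state; infer_instance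

-- ===== CLAIM (what is proved, stated in full; the proofs are below) =====
def Claim_equal_decay_body_state : Prop := ∀ (body_state : String) (scenes_elapsed : Int), Dom_decay_body_state body_state scenes_elapsed → Spec_decay_body_state body_state scenes_elapsed (decay_body_state body_state scenes_elapsed)

-- ===== LEMMAS AND PROOFS =====

-- states whose table entry has weight 0 are fixed points of A's loop
theorem decayLoop_fix (t : String) (e : String)
    (h : bodyStateDecay.get? t = some (e, 0)) : ∀ n, decayLoop n t = t := by
  intro n
  cases n with
  | zero => rfl
  | succ n => simp [decayLoop, h]

-- unknown states are fixed points of A's loop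
theorem decayLoop_none (t : String) (h : bodyStateDecay.get? t = none) :
    ∀ n, decayLoop n t = t := by
  intro n
  cases n with
  | zero => rfl
  | succ n => simp [decayLoop, h]

-- A's loop after one advancing step
theorem decayLoop_step (t nxt : String) (w : Int)
    (h : bodyStateDecay.get? t = some (nxt, w)) (hw : w ≠ 0) :
    ∀ n, decayLoop (n + 1) t = decayLoop n nxt := by
  intro n
  simp [decayLoop, h, hw]

-- states with a singleton path: both sides return the state itself
theorem agree_trivial (t : String) (hpath : (decayPaths.get? t).getD [t] = [t])
    (hfix : ∀ n, decayLoop n t = t) (se : Int) :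
    decay_body_state t se = decay_body_state_alt t se := by
  simp only [decay_body_state, decay_body_state_alt]
  rw [hpath, hfix]
  have hmin : min (max se 0) ((([t] : List String).length : Int) - 1) = 0 := by
    simp
  rw [hmin]
  rfl

theorem decayLoop_dry : ∀ n, decayLoop n "dry" = "dry" :=
  decayLoop_fix _ "clean" (by decide)
theorem decayLoop_clean : ∀ n, decayLoop n "clean" = "clean" :=
  decayLoop_fix _ "clean" (by decide)

-- depth-1 states: path [t, fix]; A reaches the fixed point after one scene
theorem agree_depth1 (t nxt : String) (w : Int)
    (h : bodyStateDecay.get? t = some (nxt, w)) (hw : w ≠ 0)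
    (hpath : (decayPaths.get? t).getD [t] = [t, nxt])
    (hfix : ∀ n, decayLoop n nxt = nxt) (se : Int) :
    decay_body_state t se = decay_body_state_alt t se := by
  simp only [decay_body_state, decay_body_state_alt]
  rw [hpath]
  by_cases hle : se ≤ 0
  · have : se.toNat = 0 := Int.toNat_of_nonpos hle
    rw [this]
    have hmin : min (max se 0) ((([t, nxt] : List String).length : Int) - 1) = 0 := by
      simp; omega
    rw [hmin]; rfl
  · have h1 : se.toNat = (se.toNat - 1) + 1 := by omega
    rw [h1, decayLoop_step t nxt w h hw, hfix]
    have hmin : min (max se 0) ((([t, nxt] : List String).length : Int) - 1) = 1 := by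
      simp; omega
    rw [hmin]; rfl

-- depth-2 states: path [t, mid, fix]
theorem agree_depth2 (t mid fix : String) (w1 w2 : Int)
    (h1 : bodyStateDecay.get? t = some (mid, w1)) (hw1 : w1 ≠ 0)
    (h2 : bodyStateDecay.get? mid = some (fix, w2)) (hw2 : w2 ≠ 0)
    (hpath : (decayPaths.get? t).getD [t] = [t, mid, fix])
    (hfix : ∀ n, decayLoop n fix = fix) (se : Int) :
    decay_body_state t se = decay_body_state_alt t se := by
  simp only [decay_body_state, decay_body_state_alt]
  rw [hpath]
  by_cases hle : se ≤ 0
  · have : se.toNat = 0 := Int.toNat_of_nonpos hle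
    rw [this]
    have hmin : min (max se 0) ((([t, mid, fix] : List String).length : Int) - 1) = 0 := by
      simp; omega
    rw [hmin]; rfl
  · by_cases h1eq : se = 1
    · have : se.toNat = 1 := by omega
      rw [this, decayLoop_step t mid w1 h1 hw1]
      have hmin : min (max se 0) ((([t, mid, fix] : List String).length : Int) - 1) = 1 := by
        simp; omega
      rw [hmin]; rfl
    · have hsplit : se.toNat = (se.toNat - 2) + 1 + 1 := by omega
      rw [hsplit, decayLoop_step t mid w1 h1 hw1, decayLoop_step mid fix w2 h2 hw2, hfix]
      have hmin : min (max se 0) ((([t, mid, fix] : List String).length : Int) - 1) = 2 := by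
        simp; omega
      rw [hmin]; rfl

-- ===== VERDICT (by name: the statement is the Claim_ definition above) =====
theorem decay_body_state_spec : Claim_equal_decay_body_state := by
  intro bs se _
  unfold Spec_decay_body_state
  by_cases hwet : bs = "wet"
  · subst hwet
    exact agree_depth2 _ "damp" "dry" 2 1 (by decide) (by decide) (by decide) (by decide)
      (by decide) decayLoop_dry se
  by_cases hdamp : bs = "damp"
  · subst hdamp
    exact agree_depth1 _ "dry" 1 (by decide) (by decide) (by decide) decayLoop_dry se
  by_cases hdry : bs = "dry"
  · subst hdry; exact agree_trivial _ (by decide) decayLoop_dry se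
  by_cases hbl : bs = "bloody"
  · subst hbl
    exact agree_depth2 _ "stained" "clean" 2 1 (by decide) (by decide) (by decide) (by decide)
      (by decide) decayLoop_clean se
  by_cases hst : bs = "stained"
  · subst hst
    exact agree_depth1 _ "clean" 1 (by decide) (by decide) (by decide) decayLoop_clean se
  by_cases hdi : bs = "dirty"
  · subst hdi
    exact agree_depth2 _ "dusty" "clean" 2 1 (by decide) (by decide) (by decide) (by decide)
      (by decide) decayLoop_clean se
  by_cases hdu : bs = "dusty"
  · subst hdu
    exact agree_depth1 _ "clean" 1 (by decide) (by decide) (by decide) decayLoop_clean se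
  by_cases hsw : bs = "sweaty"
  · subst hsw
    exact agree_depth1 _ "clean" 1 (by decide) (by decide) (by decide) decayLoop_clean se
  by_cases hcl : bs = "clean"
  · subst hcl; exact agree_trivial _ (by decide) decayLoop_clean se
  · -- unknown state: no entry in either table
    have hnone : bodyStateDecay.get? bs = none := by
      simp [bodyStateDecay, PySem.Dict.get?_mk_cons,
        Ne.symm hwet, Ne.symm hdamp, Ne.symm hdry, Ne.symm hbl, Ne.symm hst, Ne.symm hdi,
        Ne.symm hdu, Ne.symm hsw, Ne.symm hcl]
      rfl
    have hpnone : decayPaths.get? bs = none := by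
      simp [decayPaths, PySem.Dict.get?_mk_cons,
        Ne.symm hwet, Ne.symm hdamp, Ne.symm hdry, Ne.symm hbl, Ne.symm hst, Ne.symm hdi,
        Ne.symm hdu, Ne.symm hsw, Ne.symm hcl]
      rfl
    apply agree_trivial bs
    · simp [hpnone]
    · exact decayLoop_none bs hnone
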